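-- pv_equiv track=rewrite | github.com/andrebrito16/python-academy | quizzes/quiz4/palavras_iguais.py | palavras_sao_iguais
-- ===== SOURCE A (Python) =====
-- def palavras_sao_iguais(palavras):
--   p1 = palavras.split("-")
--   if len(p1) < 2:
--     return False
--   modelo = p1[0]
--
--   iguais = True
--
--   for p in p1:
--     if p != modelo:
--       iguais = False
--
--
--   return iguais
-- ===== SOURCE B (Python) =====
-- def palavras_sao_iguais(palavras):
--     m = palavras.count("-")
--     if m == 0:
--         return False
--     tam = (len(palavras) - m) // (m + 1)
--     modelo = palavras[:tam]
--     return palavras == "-".join([modelo] * (m + 1))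
-- ===== Notes on version B (the rewrite author's own statement) =====
-- stated objective: alternative
-- what changed: Instead of splitting on the dash separator and scanning the parts with a boolean flag, B never splits: it counts the dash separators, derives the common part length arithmetically, takes that prefix as the model, reconstructs the expected string by joining repeated copies of the model with the separator, and compares it to the input in one string equality.
import Mathlib
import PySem

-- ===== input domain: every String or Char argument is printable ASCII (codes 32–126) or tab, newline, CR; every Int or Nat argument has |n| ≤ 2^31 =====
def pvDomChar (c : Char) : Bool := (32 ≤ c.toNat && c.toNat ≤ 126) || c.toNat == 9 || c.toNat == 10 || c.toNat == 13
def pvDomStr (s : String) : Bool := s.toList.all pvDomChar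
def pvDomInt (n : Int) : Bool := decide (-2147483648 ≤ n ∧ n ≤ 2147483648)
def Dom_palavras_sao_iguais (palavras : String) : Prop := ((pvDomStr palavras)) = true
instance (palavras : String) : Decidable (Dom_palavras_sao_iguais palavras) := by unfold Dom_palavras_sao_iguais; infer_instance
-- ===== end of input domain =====

-- B replaces A's split-then-scan (boolean flag against the first part) by a reconstruction:
-- count the dash separators, derive the common part length arithmetically, take that prefix
-- as the model and compare the input with the separator-join of repeated copies of it
-- (alternative; same cost).

-- ===== PORT A =====
def palavras_sao_iguais (palavras : String) : Bool :=
  let p1 := (PySem.Str.split? palavras "-").getD []  -- sep "-" ≠ "", so split? is some; getD only for totality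
  if p1.length < 2 then false
  else
    -- p1[0]: safe, the guard above ensures p1 is nonempty
    let modelo := p1.headD ""
    p1.foldl (fun iguais p => if p ≠ modelo then false else iguais) true

-- ===== PORT B =====
def palavras_sao_iguais_alt (palavras : String) : Bool :=
  let m := PySem.Str.count palavras "-"
  if m == 0 then false
  else
    let tam : Int := PySem.Int.floordiv (PySem.Str.len palavras - (m : Int)) ((m : Int) + 1)
    let modelo := PySem.Str.slice palavras none (some tam)
    palavras == PySem.Str.join "-" (List.replicate (m + 1) modelo)

-- ===== PRECONDITION & SPEC =====
def Spec_palavras_sao_iguais (palavras : String) (out : Bool) : Prop := out = palavras_sao_iguais_alt palavras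
instance (palavras : String) (out : Bool) : Decidable (Spec_palavras_sao_iguais palavras out) := by unfold Spec_palavras_sao_iguais; infer_instance

-- ===== CLAIM (what is proved, stated in full; the proofs are below) =====
def Claim_equal_palavras_sao_iguais : Prop := ∀ (palavras : String), Dom_palavras_sao_iguais palavras → Spec_palavras_sao_iguais palavras (palavras_sao_iguais palavras)

-- ===== LEMMAS AND PROOFS =====

-- reference specification of Python's split('-') over a char list
def pvSplitDash : List Char → List (List Char)
  | [] => [[]]
  | c :: r => if c = '-' then [] :: pvSplitDash r else (pvSplitDash r).modifyHead (c :: ·)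

theorem pvSplitDash_ne_nil (l : List Char) : pvSplitDash l ≠ [] := by
  cases l with
  | nil => simp [pvSplitDash]
  | cons c r =>
    simp only [pvSplitDash]
    split_ifs
    · simp
    · rcases h : pvSplitDash r with _ | ⟨a, t⟩
      · exact absurd h (pvSplitDash_ne_nil r)
      · simp

theorem pv_splitOn_go_eq (l : List Char) : ∀ (fuel : ℕ) (cur : List Char) (acc : List (List Char)),
    l.length ≤ fuel →
    PySem.Chars.splitOn.go ['-'] fuel l cur acc
      = acc.reverse ++ (pvSplitDash l).modifyHead (cur.reverse ++ ·) := by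
  induction l with
  | nil =>
    intro fuel cur acc _
    cases fuel <;> simp [PySem.Chars.splitOn.go, pvSplitDash]
  | cons c r ih =>
    intro fuel cur acc hf
    cases fuel with
    | zero => simp at hf
    | succ f =>
      have hr : r.length ≤ f := by simpa using hf
      by_cases hc : c = '-'
      · subst hc
        have hpre : List.isPrefixOf ['-'] ('-' :: r) = true := by
          simp [List.isPrefixOf]
        have hstep : PySem.Chars.splitOn.go ['-'] (f + 1) ('-' :: r) cur acc
            = PySem.Chars.splitOn.go ['-'] f r [] (cur.reverse :: acc) := by
          simp [PySem.Chars.splitOn.go, hpre]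
        rw [hstep, ih f [] (cur.reverse :: acc) hr]
        simp [pvSplitDash]
        rcases pvSplitDash r with _ | ⟨a, t⟩ <;> simp
      · have hpre : List.isPrefixOf ['-'] (c :: r) = false := by
          simp [List.isPrefixOf]
          exact fun h => absurd h.symm hc
        have hstep : PySem.Chars.splitOn.go ['-'] (f + 1) (c :: r) cur acc
            = PySem.Chars.splitOn.go ['-'] f r (c :: cur) acc := by
          simp [PySem.Chars.splitOn.go, hpre]
        rw [hstep, ih f (c :: cur) acc hr]
        rcases h : pvSplitDash r with _ | ⟨a, t⟩
        · exact absurd h (pvSplitDash_ne_nil r)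
        · simp [pvSplitDash, if_neg hc, h, List.append_assoc]

theorem pv_splitOn_eq (l : List Char) : PySem.Chars.splitOn l ['-'] = pvSplitDash l := by
  unfold PySem.Chars.splitOn
  rw [pv_splitOn_go_eq l (l.length + 1) [] [] (by omega)]
  rcases pvSplitDash l with _ | ⟨a, t⟩ <;> simp

theorem pv_count_go_eq (l : List Char) : ∀ (fuel acc : ℕ), l.length ≤ fuel →
    PySem.Chars.count.go ['-'] fuel l acc = acc + l.count '-' := by
  induction l with
  | nil => intro fuel acc _; cases fuel <;> simp [PySem.Chars.count.go]
  | cons c r ih =>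
    intro fuel acc hf
    cases fuel with
    | zero => simp at hf
    | succ f =>
      have hr : r.length ≤ f := by simpa using hf
      by_cases hc : c = '-'
      · subst hc
        have hpre : List.isPrefixOf ['-'] ('-' :: r) = true := by simp [List.isPrefixOf]
        have hstep : PySem.Chars.count.go ['-'] (f + 1) ('-' :: r) acc
            = PySem.Chars.count.go ['-'] f r (acc + 1) := by
          simp [PySem.Chars.count.go, hpre]
        rw [hstep, ih f (acc + 1) hr]
        simp
        omega
      · have hpre : List.isPrefixOf ['-'] (c :: r) = false := by
          simp [List.isPrefixOf]
          exact fun h => absurd h.symm hc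
        have hstep : PySem.Chars.count.go ['-'] (f + 1) (c :: r) acc
            = PySem.Chars.count.go ['-'] f r acc := by
          simp [PySem.Chars.count.go, hpre]
        rw [hstep, ih f acc hr]
        simp [hc]

theorem pv_count_eq (l : List Char) : PySem.Chars.count l ['-'] = l.count '-' := by
  unfold PySem.Chars.count
  rw [if_neg (by simp)]
  rw [pv_count_go_eq l l.length 0 le_rfl]
  omega

theorem pv_length_splitDash (l : List Char) : (pvSplitDash l).length = l.count '-' + 1 := by
  induction l with
  | nil => simp [pvSplitDash]
  | cons c r ih =>
    by_cases hc : c = '-'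
    · simp [pvSplitDash, hc, ih]
    · simp [pvSplitDash, hc, ih]

-- A's flag loop computes "every element equals modelo"
theorem pv_foldl_flag (mo : String) (l : List String) (b : Bool) :
    l.foldl (fun iguais p => if p ≠ mo then false else iguais) b = (b && l.all (· == mo)) := by
  induction l generalizing b with
  | nil => simp
  | cons x xs ih =>
    simp only [List.foldl, List.all_cons, ih]
    by_cases h : x = mo <;> simp [h]

theorem pv_splitDash_no_dash (q : List Char) (hq : '-' ∉ q) : pvSplitDash q = [q] := by
  induction q with
  | nil => simp [pvSplitDash]
  | cons c r ih =>
    have hc : c ≠ '-' := fun h => hq (h ▸ List.mem_cons_self)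
    have hr : '-' ∉ r := fun h => hq (List.mem_cons_of_mem _ h)
    simp [pvSplitDash, hc, ih hr]

theorem pv_splitDash_append (q t : List Char) (hq : '-' ∉ q) :
    pvSplitDash (q ++ '-' :: t) = q :: pvSplitDash t := by
  induction q with
  | nil => simp [pvSplitDash]
  | cons c r ih =>
    have hc : c ≠ '-' := fun h => hq (h ▸ List.mem_cons_self)
    have hr : '-' ∉ r := fun h => hq (List.mem_cons_of_mem _ h)
    simp [pvSplitDash, hc, ih hr]

theorem pv_join_splitDash (l : List Char) : PySem.Chars.join ['-'] (pvSplitDash l) = l := by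
  induction l with
  | nil => simp [pvSplitDash, PySem.Chars.join_singleton]
  | cons c r ih =>
    rcases h : pvSplitDash r with _ | ⟨a, t⟩
    · exact absurd h (pvSplitDash_ne_nil r)
    · by_cases hc : c = '-'
      · rw [hc]
        have hstep : pvSplitDash ('-' :: r) = [] :: a :: t := by simp [pvSplitDash, h]
        rw [hstep, PySem.Chars.join_cons_cons]
        rw [h] at ih
        simp [ih]
      · simp only [pvSplitDash, if_neg hc, h, List.modifyHead]
        rcases t with _ | ⟨b, t'⟩
        · rw [PySem.Chars.join_singleton]
          rw [h, PySem.Chars.join_singleton] at ih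
          simp [ih]
        · rw [PySem.Chars.join_cons_cons]
          rw [h, PySem.Chars.join_cons_cons] at ih
          simp [← ih]

theorem pv_join_replicate_succ (q : List Char) (k : ℕ) :
    PySem.Chars.join ['-'] (List.replicate (k + 2) q)
      = q ++ '-' :: PySem.Chars.join ['-'] (List.replicate (k + 1) q) := by
  simp only [List.replicate, PySem.Chars.join_cons_cons]
  simp

theorem pv_count_join_replicate (q : List Char) (k : ℕ) :
    (PySem.Chars.join ['-'] (List.replicate (k + 1) q)).count '-'
      = k + (k + 1) * q.count '-' := by
  induction k with
  | zero => simp [PySem.Chars.join_singleton]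
  | succ n ih =>
    rw [pv_join_replicate_succ, List.count_append, List.count_cons, ih]
    simp
    ring

theorem pv_splitDash_join_replicate (q : List Char) (hq : '-' ∉ q) (k : ℕ) :
    pvSplitDash (PySem.Chars.join ['-'] (List.replicate (k + 1) q)) = List.replicate (k + 1) q := by
  induction k with
  | zero => simp [PySem.Chars.join_singleton, pv_splitDash_no_dash q hq]
  | succ n ih =>
    rw [pv_join_replicate_succ, pv_splitDash_append _ _ hq, ih]
    simp [List.replicate]

theorem pv_len_join_replicate (q : List Char) (k : ℕ) :
    (PySem.Chars.join ['-'] (List.replicate (k + 1) q)).length = (k + 1) * q.length + k := by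
  induction k with
  | zero => simp [PySem.Chars.join_singleton]
  | succ n ih =>
    rw [pv_join_replicate_succ]
    simp [ih]
    ring

-- ===== VERDICT (by name: the statement is the Claim_ definition above) =====
theorem palavras_sao_iguais_spec : Claim_equal_palavras_sao_iguais := by
  intro s _
  unfold Spec_palavras_sao_iguais palavras_sao_iguais palavras_sao_iguais_alt
  -- char-level data
  set cs := s.toList with hcs
  set P := pvSplitDash cs with hP
  set m := cs.count '-' with hm
  -- the string-level split is some PS with PS.map toList = P
  have hsplit : (PySem.Str.split? s "-") = some ((PySem.Str.split? s "-").getD []) ∧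
      ((PySem.Str.split? s "-").getD []).map String.toList = P := by
    have h1 := PySem.Str.split?_map s "-"
    have h2 : PySem.Chars.split? s.toList ("-" : String).toList = some P := by
      show PySem.Chars.split? s.toList ['-'] = some P
      unfold PySem.Chars.split?
      rw [if_neg (by simp), pv_splitOn_eq]
    rw [h2] at h1
    rcases h3 : PySem.Str.split? s "-" with _ | PS
    · rw [h3] at h1; simp at h1
    · rw [h3] at h1
      simp at h1 ⊢
      exact h1
  obtain ⟨_, hPS⟩ := hsplit
  set PS := (PySem.Str.split? s "-").getD [] with hPSdef
  -- lengths
  have hlenPS : PS.length = m + 1 := by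
    have h1 := congrArg List.length hPS
    simp only [List.length_map] at h1
    rw [h1, hP, pv_length_splitDash, hm]
  have hcount : PySem.Str.count s "-" = m := by
    rw [PySem.Str.count_eq]
    show PySem.Chars.count cs ['-'] = m
    rw [pv_count_eq]
  simp only [hcount]
  by_cases hm0 : m = 0
  · -- one part: both sides short-circuit to false
    rw [if_pos (by omega : PS.length < 2)]
    simp [hm0]
  · rw [if_neg (by omega : ¬ PS.length < 2)]
    rw [if_neg (by simpa using hm0)]
    rw [pv_foldl_flag, Bool.true_and]
    -- both remaining sides are Bools; prove them equal via ↔ on = true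
    obtain ⟨k, hk⟩ : ∃ k, m = k + 1 := ⟨m - 1, by omega⟩
    have hlen : PySem.Str.len s = (cs.length : Int) := by
      rw [PySem.Str.len_eq]
    rcases hPScons : PS with _ | ⟨h0, Pt⟩
    · rw [hPScons] at hlenPS; simp at hlenPS
    rw [← hPScons]
    have hhead : PS.headD "" = h0 := by rw [hPScons]; simp
    apply Bool.eq_iff_iff.mpr
    constructor
    · -- A true → B true
      intro hall
      rw [List.all_eq_true] at hall
      have hrep : PS = List.replicate (m + 1) h0 := by
        rw [List.eq_replicate_iff]
        refine ⟨hlenPS, fun b hb => ?_⟩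
        have := hall b hb
        rw [hhead] at this
        simpa using this
      -- cs = join of replicate
      have hcs_eq : cs = PySem.Chars.join ['-'] (List.replicate (m + 1) h0.toList) := by
        have : PS.map String.toList = List.replicate (m + 1) h0.toList := by
          rw [hrep, List.map_replicate]
        rw [this] at hPS
        calc cs = PySem.Chars.join ['-'] (pvSplitDash cs) := (pv_join_splitDash cs).symm
          _ = _ := by rw [← hP, ← hPS]
      have hn : cs.length = (m + 1) * h0.toList.length + m := by
        rw [hcs_eq]
        exact pv_len_join_replicate h0.toList m
      have htam : PySem.Int.floordiv (PySem.Str.len s - (m : Int)) ((m : Int) + 1)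
          = (h0.toList.length : Int) := by
        rw [hlen, hn]
        unfold PySem.Int.floordiv
        have : ((((m + 1) * h0.toList.length + m : ℕ) : Int) - (m : Int))
            = ((m : Int) + 1) * (h0.toList.length : Int) := by push_cast; ring
        rw [this]
        exact Int.mul_fdiv_cancel_left _ (by omega)
      have hmodelo : PySem.Str.slice s none (some (PySem.Int.floordiv (PySem.Str.len s - (m : Int)) ((m : Int) + 1))) = h0 := by
        apply String.toList_inj.mp
        rw [PySem.Str.toList_slice, htam]
        show PySem.List.slice cs none (some ((h0.toList.length : ℕ) : Int)) = h0.toList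
        rw [PySem.List.slice_to cs (by positivity)]
        rw [Int.toNat_natCast]
        rw [hcs_eq, hk]
        rw [pv_join_replicate_succ]
        exact List.take_left
      rw [hmodelo]
      apply beq_iff_eq.mpr
      apply String.toList_inj.mp
      rw [PySem.Str.toList_join, List.map_replicate]
      show cs = PySem.Chars.join ("-" : String).toList (List.replicate (m + 1) h0.toList)
      exact hcs_eq
    · -- B true → A true
      intro hb
      set tam := PySem.Int.floordiv (PySem.Str.len s - (m : Int)) ((m : Int) + 1) with htamdef
      set q := PySem.Str.slice s none (some tam) with hqdef
      have hs_eq : cs = PySem.Chars.join ['-'] (List.replicate (m + 1) q.toList) := by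
        have := beq_iff_eq.mp hb
        have h2 := congrArg String.toList this
        rw [PySem.Str.toList_join, List.map_replicate] at h2
        exact h2
      -- q contains no dash: count both sides
      have hqc : q.toList.count '-' = 0 := by
        have h1 : cs.count '-' = m + (m + 1) * q.toList.count '-' := by
          conv_lhs => rw [hs_eq]
          exact pv_count_join_replicate q.toList m
        rw [← hm] at h1
        have h3 : m + (m + 1) * q.toList.count '-' = m + 0 := by
          rw [← h1]; omega
        have h2 := Nat.add_left_cancel h3
        simpa [Nat.mul_eq_zero] using h2
      have hqnd : '-' ∉ q.toList := by
        intro hmem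
        have := List.count_pos_iff.mpr hmem
        omega
      have hPrep : P = List.replicate (m + 1) q.toList := by
        rw [hP, hs_eq]
        exact pv_splitDash_join_replicate q.toList hqnd m
      -- every string part equals q, in particular the head
      have hallq : ∀ p ∈ PS, p = q := by
        intro p hp
        have : p.toList ∈ P := by
          rw [← hPS]
          exact List.mem_map_of_mem hp
        rw [hPrep] at this
        have := List.eq_of_mem_replicate this
        exact String.toList_inj.mp this
      have hh0 : h0 = q := hallq h0 (by rw [hPScons]; simp)
      rw [List.all_eq_true]
      intro b hb'
      rw [hhead, hh0, hallq b hb']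
      simp
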